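-- pv_equiv track=rewrite | github.com/itu-itis23-mahmoud21/local-wikipedia-rag-assistant | src/wiki_client.py | normalize_wikipedia_text
-- ===== SOURCE A (Python) =====
-- UNWANTED_SECTION_HEADINGS = {
--     "see also",
--     "notes",
--     "references",
--     "works cited",
--     "further reading",
--     "external links",
--     "bibliography",
--     "sources",
--     "citations",
--     "publications",
--     "selected publications",
--     "film and television",
--     "in popular culture",
--     "popular culture",
--     "commemoration",
--     "honours",
--     "honors",
--     "awards and honours",
--     "awards and honors",
-- }
--
-- def normalize_wikipedia_text(text: str) -> str:
--     """Normalize line endings, remove footers, and collapse blank lines."""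
--
--     normalized = text.replace("\r\n", "\n").replace("\r", "\n")
--     normalized = remove_unwanted_wikipedia_sections(normalized)
--     output_lines: list[str] = []
--     previous_blank = False
--
--     for line in normalized.split("\n"):
--         clean_line = line.strip()
--         if not clean_line:
--             if not previous_blank:
--                 output_lines.append("")
--             previous_blank = True
--             continue
--
--         output_lines.append(clean_line)
--         previous_blank = False
--
--     return "\n".join(output_lines).strip()
--
-- def remove_unwanted_wikipedia_sections(text: str) -> str:
--     """Remove trailing Wikipedia footer/reference sections from plain text."""
--
--     normalized = text.replace("\r\n", "\n").replace("\r", "\n")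
--     kept_lines: list[str] = []
--
--     for line in normalized.split("\n"):
--         clean_line = line.strip()
--         if clean_line.casefold() in UNWANTED_SECTION_HEADINGS:
--             break
--         kept_lines.append(line)
--
--     return "\n".join(kept_lines).strip()
-- ===== SOURCE B (Python) =====
-- UNWANTED_SECTION_HEADINGS = {
--     "see also", "notes", "references", "works cited", "further reading",
--     "external links", "bibliography", "sources", "citations", "publications",
--     "selected publications", "film and television", "in popular culture",
--     "popular culture", "commemoration", "honours", "honors",
--     "awards and honours", "awards and honors",
-- }
--
-- def normalize_wikipedia_text(text: str) -> str:
--     """Single fused pass: cut the footer, strip lines and collapse blanks as we go."""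
--     output_lines = []
--     previous_blank = False
--     for line in text.replace("\r\n", "\n").replace("\r", "\n").split("\n"):
--         clean_line = line.strip()
--         if clean_line.casefold() in UNWANTED_SECTION_HEADINGS:
--             break
--         if clean_line:
--             output_lines.append(clean_line)
--             previous_blank = False
--         elif not previous_blank:
--             output_lines.append("")
--             previous_blank = True
--     return "\n".join(output_lines).strip()
-- ===== Notes on version B (the rewrite author's own statement) =====
-- stated objective: simpler
-- what changed: Replaces the two sequential build-join-strip-resplit passes (helper cuts the footer and re-normalizes/joins/strips, then the main loop resplits and collapses blanks) with one fused loop over the lines that breaks at an unwanted heading and collapses blanks in the same iteration, joining and stripping once at the end.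
import Mathlib
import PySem

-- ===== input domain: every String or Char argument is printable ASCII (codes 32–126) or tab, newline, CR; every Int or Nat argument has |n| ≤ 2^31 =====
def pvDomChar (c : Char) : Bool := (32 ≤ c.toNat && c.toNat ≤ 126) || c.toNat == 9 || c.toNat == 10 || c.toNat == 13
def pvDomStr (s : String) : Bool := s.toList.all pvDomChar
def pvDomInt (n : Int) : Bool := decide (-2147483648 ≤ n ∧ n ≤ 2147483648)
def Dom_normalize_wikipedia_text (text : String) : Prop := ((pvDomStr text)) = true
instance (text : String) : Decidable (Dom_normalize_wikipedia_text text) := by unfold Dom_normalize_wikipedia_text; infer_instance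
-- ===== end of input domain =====

-- B fuses A's two sequential passes (footer cut + join/strip/resplit, then blank-collapse) into one loop over the lines; objective: simpler.

-- ===== PORT A =====
-- UNWANTED_SECTION_HEADINGS (a Python set of ASCII strings; only membership is used)
def pvHeadings : PySem.Set (List Char) :=
  PySem.Set.ofList ((["see also", "notes", "references", "works cited", "further reading",
    "external links", "bibliography", "sources", "citations", "publications",
    "selected publications", "film and television", "in popular culture",
    "popular culture", "commemoration", "honours", "honors",
    "awards and honours", "awards and honors"] : List String).map String.toList)

-- text.replace("\r\n", "\n").replace("\r", "\n")
def pvNormalizeCR (s : List Char) : List Char :=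
  PySem.Chars.replace (PySem.Chars.replace s ['\r', '\n'] ['\n']) ['\r'] ['\n']

-- the 'for line in …: if …: break; kept_lines.append(line)' loop of remove_unwanted_wikipedia_sections
-- (str.casefold is ported as PySem.Chars.lower: they agree on the ASCII domain Dom)
def pvKeepLoop : List (List Char) → List (List Char) → List (List Char)
  | [], kept => kept
  | line :: rest, kept =>
    if PySem.Set.contains pvHeadings (PySem.Chars.lower (PySem.Chars.strip line)) then kept
    else pvKeepLoop rest (kept ++ [line])

-- remove_unwanted_wikipedia_sections
def pvRemoveUnwanted (text : List Char) : List Char :=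
  let normalized := pvNormalizeCR text
  PySem.Chars.strip (PySem.Chars.join ['\n']
    (pvKeepLoop (PySem.Chars.splitOn normalized ['\n']) []))

-- the 'for line in normalized.split("\n")' loop of normalize_wikipedia_text (state: output_lines, previous_blank)
def pvCollapseA : List (List Char) → List (List Char) → Bool → List (List Char)
  | [], out, _ => out
  | line :: rest, out, prev =>
    let clean := PySem.Chars.strip line
    if clean = [] then
      if prev then pvCollapseA rest out true
      else pvCollapseA rest (out ++ [[]]) true
    else pvCollapseA rest (out ++ [clean]) false

def normalize_wikipedia_text (text : String) : String :=
  let normalized := pvNormalizeCR text.toList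
  let normalized2 := pvRemoveUnwanted normalized
  String.ofList (PySem.Chars.strip (PySem.Chars.join ['\n']
    (pvCollapseA (PySem.Chars.splitOn normalized2 ['\n']) [] false)))

-- ===== PORT B =====
-- the single fused loop of Source B (break at a heading, collapse blanks, all in one pass)
def pvFused : List (List Char) → List (List Char) → Bool → List (List Char)
  | [], out, _ => out
  | line :: rest, out, prev =>
    let clean := PySem.Chars.strip line
    if PySem.Set.contains pvHeadings (PySem.Chars.lower clean) then out
    else if clean ≠ [] then pvFused rest (out ++ [clean]) false
    else if prev then pvFused rest out true
    else pvFused rest (out ++ [[]]) true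

def normalize_wikipedia_text_alt (text : String) : String :=
  String.ofList (PySem.Chars.strip (PySem.Chars.join ['\n']
    (pvFused (PySem.Chars.splitOn (pvNormalizeCR text.toList) ['\n']) [] false)))

-- ===== PRECONDITION & SPEC =====
def Spec_normalize_wikipedia_text (text : String) (out : String) : Prop := out = normalize_wikipedia_text_alt text
instance (text : String) (out : String) : Decidable (Spec_normalize_wikipedia_text text out) := by unfold Spec_normalize_wikipedia_text; infer_instance

-- ===== CLAIM (what is proved, stated in full; the proofs are below) =====
def Claim_equal_normalize_wikipedia_text : Prop := ∀ (text : String), Dom_normalize_wikipedia_text text → Spec_normalize_wikipedia_text text (normalize_wikipedia_text text)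

-- ===== LEMMAS AND PROOFS =====

def sp : List Char → List (List Char)
  | [] => [[]]
  | a :: t => if a = '\n' then [] :: sp t else (sp t).modifyHead (a :: ·)

def prependFirst (x : List Char) : List (List Char) → List (List Char)
  | [] => [x]
  | y :: ys => (x ++ y) :: ys

theorem sp_ne_nil (l : List Char) : sp l ≠ [] := by
  induction l with
  | nil => simp [sp]
  | cons a t ih =>
    simp only [sp]
    split
    · simp
    · cases h : sp t with
      | nil => exact absurd h ih
      | cons y ys => simp [List.modifyHead]

theorem sp_no_nl (l : List Char) : ∀ p ∈ sp l, '\n' ∉ p := by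
  induction l with
  | nil => simp [sp]
  | cons a t ih =>
    simp only [sp]
    split
    · intro p hp
      rcases List.mem_cons.1 hp with h | h
      · simp [h]
      · exact ih p h
    · rename_i ha
      cases h : sp t with
      | nil => exact absurd h (sp_ne_nil t)
      | cons y ys =>
        intro p hp
        rcases List.mem_cons.1 (by simpa [List.modifyHead, h] using hp) with h2 | h2
        · subst h2
          have hy := ih y (by simp [h])
          simp only [List.mem_cons]
          rintro (rfl | hc)
          · exact ha rfl
          · exact hy hc
        · exact ih p (by simp [h, h2])

theorem sp_append (x l : List Char) (h : '\n' ∉ x) :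
    sp (x ++ l) = (sp l).modifyHead (x ++ ·) := by
  induction x with
  | nil =>
    cases hs : sp l with
    | nil => exact absurd hs (sp_ne_nil l)
    | cons y ys => simp [hs, List.modifyHead]
  | cons a t ih =>
    have ha : a ≠ '\n' := by rintro rfl; simp at h
    have ht : '\n' ∉ t := fun hc => h (List.mem_cons_of_mem _ hc)
    cases hs : sp l with
    | nil => exact absurd hs (sp_ne_nil l)
    | cons y ys =>
      simp only [List.cons_append, sp, ha, if_neg, ih ht, hs, List.modifyHead]
      simp [ha]

theorem sp_of_no_nl (x : List Char) (h : '\n' ∉ x) : sp x = [x] := by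
  have := sp_append x [] h
  simpa [sp, List.modifyHead] using this

theorem join_sp (l : List Char) : PySem.Chars.join ['\n'] (sp l) = l := by
  induction l with
  | nil => simp [sp, PySem.Chars.join_singleton]
  | cons a t ih =>
    simp only [sp]
    split
    · rename_i ha
      cases hs : sp t with
      | nil => exact absurd hs (sp_ne_nil t)
      | cons y ys =>
        subst ha
        rw [PySem.Chars.join_cons_cons]
        simp [← hs, ih]
    · cases hs : sp t with
      | nil => exact absurd hs (sp_ne_nil t)
      | cons y ys =>
        cases ys with
        | nil =>
          simp only [List.modifyHead, PySem.Chars.join_singleton]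
          rw [hs] at ih
          simp [PySem.Chars.join_singleton] at ih
          simp [ih]
        | cons z zs =>
          simp only [List.modifyHead]
          rw [hs] at ih
          rw [PySem.Chars.join_cons_cons] at ih ⊢
          simp [← ih]

theorem sp_join (X : List (List Char)) (hne : X ≠ []) (h : ∀ p ∈ X, '\n' ∉ p) :
    sp (PySem.Chars.join ['\n'] X) = X := by
  induction X with
  | nil => exact absurd rfl hne
  | cons x xs ih =>
    cases xs with
    | nil => simp [PySem.Chars.join_singleton, sp_of_no_nl x (h x (by simp))]
    | cons y ys =>
      rw [PySem.Chars.join_cons_cons]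
      rw [List.append_assoc, sp_append x _ (h x (by simp))]
      have : sp (['\n'] ++ PySem.Chars.join ['\n'] (y :: ys)) = [] :: sp (PySem.Chars.join ['\n'] (y :: ys)) := by
        simp [sp]
      rw [this, ih (by simp) (fun p hp => h p (by simp [hp]))]
      simp [List.modifyHead]
theorem head_of_cons_eq {α : Type} {l : List α} {c : α} {t : List α} (h : l = c :: t)
    (hne : l ≠ []) : l.head hne = c := by subst h; rfl

theorem lstrip_of_all_ws {l : List Char} (h : ∀ c ∈ l, PySem.Chars.isspace c) :
    PySem.Chars.lstrip l = [] := by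
  simp [PySem.Chars.lstrip, List.dropWhile_eq_nil_iff]
  exact h

theorem strip_eq_nil_iff (l : List Char) :
    PySem.Chars.strip l = [] ↔ ∀ c ∈ l, PySem.Chars.isspace c := by
  constructor
  · intro h c hc
    simp only [PySem.Chars.strip, PySem.Chars.rstrip, PySem.Chars.lstrip] at h
    have h2 : List.dropWhile PySem.Chars.isspace (List.dropWhile PySem.Chars.isspace l).reverse = [] := by
      simpa using h
    have h3 : ∀ c ∈ (List.dropWhile PySem.Chars.isspace l).reverse, PySem.Chars.isspace c :=
      List.dropWhile_eq_nil_iff.1 h2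
    have h4 : ∀ c ∈ l, PySem.Chars.isspace c := by
      intro c hc
      have h5 : c ∈ List.takeWhile PySem.Chars.isspace l ++ List.dropWhile PySem.Chars.isspace l := by
        rw [List.takeWhile_append_dropWhile]; exact hc
      rcases List.mem_append.1 h5 with h6 | h6
      · exact List.mem_takeWhile_imp h6
      · exact h3 c (by simpa using h6)
    exact h4 c hc
  · intro h
    simp [PySem.Chars.strip, lstrip_of_all_ws h, PySem.Chars.rstrip]

theorem rstrip_eq_reverse_lstrip (l : List Char) :
    PySem.Chars.rstrip l = (PySem.Chars.lstrip l.reverse).reverse := rfl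

theorem lstrip_lstrip (l : List Char) : PySem.Chars.lstrip (PySem.Chars.lstrip l) = PySem.Chars.lstrip l := by
  simp only [PySem.Chars.lstrip]
  cases h : List.dropWhile PySem.Chars.isspace l with
  | nil => simp
  | cons c t =>
    have hne : List.dropWhile PySem.Chars.isspace l ≠ [] := by simp [h]
    have := List.head_dropWhile_not PySem.Chars.isspace hne
    rw [head_of_cons_eq h] at this
    simp [List.dropWhile_cons, this]

theorem lstrip_head_not_ws {l : List Char} {c : Char} {t : List Char}
    (h : PySem.Chars.lstrip l = c :: t) : PySem.Chars.isspace c = false := by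
  have hne : List.dropWhile PySem.Chars.isspace l ≠ [] := by
    simp only [PySem.Chars.lstrip] at h; simp [h]
  have h2 := List.head_dropWhile_not PySem.Chars.isspace hne
  simp only [PySem.Chars.lstrip] at h
  rw [head_of_cons_eq h] at h2
  exact h2

theorem lstrip_cons_not_ws {c : Char} {t : List Char} (h : PySem.Chars.isspace c = false) :
    PySem.Chars.lstrip (c :: t) = c :: t := by
  simp [PySem.Chars.lstrip, List.dropWhile_cons, h]

theorem rstrip_prefix_head {l : List Char} : PySem.Chars.rstrip l <+: l := by
  have h : PySem.Chars.lstrip l.reverse <:+ l.reverse := List.dropWhile_suffix _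
  have h2 := List.reverse_prefix.mpr h
  simpa [rstrip_eq_reverse_lstrip] using h2

theorem lstrip_rstrip_comm (l : List Char) :
    PySem.Chars.lstrip (PySem.Chars.rstrip l) = PySem.Chars.rstrip (PySem.Chars.lstrip l) := by
  cases h : PySem.Chars.lstrip l with
  | nil =>
    have hall : ∀ c ∈ l, PySem.Chars.isspace c := by
      have := List.dropWhile_eq_nil_iff.1 (by simpa [PySem.Chars.lstrip] using h)
      exact this
    have : PySem.Chars.rstrip l = [] := by
      rw [rstrip_eq_reverse_lstrip, lstrip_of_all_ws (fun c hc => hall c (List.mem_reverse.1 hc))]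
      rfl
    rw [this]
    simp [PySem.Chars.lstrip, PySem.Chars.rstrip]
  | cons c t =>
    -- l = takeWhile ++ (c :: t), c non-ws
    have hdec : l = List.takeWhile PySem.Chars.isspace l ++ (c :: t) := by
      rw [← h]; simp [PySem.Chars.lstrip, List.takeWhile_append_dropWhile]
    have hc : PySem.Chars.isspace c = false := lstrip_head_not_ws h
    have htw : ∀ x ∈ List.takeWhile PySem.Chars.isspace l, PySem.Chars.isspace x :=
      fun x hx => List.mem_takeWhile_imp hx
    -- rstrip l = takeWhile ++ rstrip (c :: t)
    have h1 : PySem.Chars.rstrip l = List.takeWhile PySem.Chars.isspace l ++ PySem.Chars.rstrip (c :: t) := by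
      conv_lhs => rw [hdec]
      rw [rstrip_eq_reverse_lstrip, List.reverse_append]
      have hne : PySem.Chars.lstrip (c :: t).reverse ≠ [] := by
        intro hh
        simp only [PySem.Chars.lstrip] at hh
        have h9 := List.dropWhile_eq_nil_iff.1 hh
        have := h9 c (by simp)
        simp [hc] at this
      rw [show PySem.Chars.lstrip ((c :: t).reverse ++ (List.takeWhile PySem.Chars.isspace l).reverse)
            = PySem.Chars.lstrip (c :: t).reverse ++ (List.takeWhile PySem.Chars.isspace l).reverse from ?_]
      · simp [rstrip_eq_reverse_lstrip]
      · simp only [PySem.Chars.lstrip] at hne ⊢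
        rw [List.dropWhile_append, if_neg (by simpa [List.isEmpty_iff] using hne)]
    -- rstrip (c :: t) starts with c
    have h2 : ∃ t', PySem.Chars.rstrip (c :: t) = c :: t' := by
      have hpre := rstrip_prefix_head (l := c :: t)
      have hne : PySem.Chars.rstrip (c :: t) ≠ [] := by
        intro hh
        rw [rstrip_eq_reverse_lstrip] at hh
        have h8 : PySem.Chars.lstrip (c :: t).reverse = [] := by
          simpa using congrArg List.reverse hh
        simp only [PySem.Chars.lstrip] at h8
        have h9 := List.dropWhile_eq_nil_iff.1 h8
        have := h9 c (by simp)
        simp [hc] at this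
      obtain ⟨d, t', hdt⟩ : ∃ d t', PySem.Chars.rstrip (c :: t) = d :: t' := by
        cases hx : PySem.Chars.rstrip (c :: t) with
        | nil => exact absurd hx hne
        | cons a b => exact ⟨a, b, rfl⟩
      rw [hdt] at hpre
      obtain ⟨s, hs⟩ := hpre
      simp at hs
      exact ⟨t', by rw [hdt, hs.1]⟩
    rcases h2 with ⟨t', ht'⟩
    rw [h1, ht']
    rw [show PySem.Chars.lstrip (List.takeWhile PySem.Chars.isspace l ++ c :: t')
          = PySem.Chars.lstrip (c :: t') from ?_]
    · rw [lstrip_cons_not_ws hc]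
    · simp only [PySem.Chars.lstrip]
      exact List.dropWhile_append_of_pos (by simpa using htw)

theorem strip_lstrip (l : List Char) : PySem.Chars.strip (PySem.Chars.lstrip l) = PySem.Chars.strip l := by
  simp [PySem.Chars.strip, lstrip_lstrip]

theorem strip_rstrip (l : List Char) : PySem.Chars.strip (PySem.Chars.rstrip l) = PySem.Chars.strip l := by
  simp only [PySem.Chars.strip]
  rw [lstrip_rstrip_comm]
  rw [rstrip_eq_reverse_lstrip (PySem.Chars.rstrip (PySem.Chars.lstrip l)),
      rstrip_eq_reverse_lstrip (PySem.Chars.lstrip l)]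
  simp [lstrip_lstrip]

theorem strip_idem (l : List Char) : PySem.Chars.strip (PySem.Chars.strip l) = PySem.Chars.strip l := by
  calc PySem.Chars.strip (PySem.Chars.rstrip (PySem.Chars.lstrip l))
      = PySem.Chars.strip (PySem.Chars.lstrip l) := strip_rstrip _
    _ = PySem.Chars.strip l := strip_lstrip _

theorem prependFirst_sp_nil (l : List Char) : prependFirst [] (sp l) = sp l := by
  cases h : sp l with
  | nil => exact absurd h (sp_ne_nil l)
  | cons y ys => simp [prependFirst]

theorem splitOn_go (fuel : Nat) : ∀ (l cur : List Char) (acc : List (List Char)), l.length ≤ fuel →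
    PySem.Chars.splitOn.go ['\n'] fuel l cur acc = acc.reverse ++ prependFirst cur.reverse (sp l) := by
  induction fuel with
  | zero =>
    intro l cur acc h
    have : l = [] := List.length_eq_zero_iff.1 (Nat.le_zero.1 h)
    subst this
    simp [PySem.Chars.splitOn.go, sp, prependFirst]
  | succ n ih =>
    intro l cur acc h
    cases l with
    | nil => simp [PySem.Chars.splitOn.go, sp, prependFirst]
    | cons c t =>
      by_cases hc : c = '\n'
      · subst hc
        have hpre : List.isPrefixOf ['\n'] ('\n' :: t) = true := by simp [List.isPrefixOf]
        rw [PySem.Chars.splitOn.go]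
        simp only [hpre, if_true]
        rw [ih _ _ _ (by simpa using Nat.le_of_succ_le_succ h)]
        cases hs : sp t with
        | nil => exact absurd hs (sp_ne_nil t)
        | cons y ys => simp [sp, hs, prependFirst]
      · have hpre : List.isPrefixOf ['\n'] (c :: t) = false := by
          simp [List.isPrefixOf, hc]
          intro hh
          exact absurd hh.symm hc
        rw [PySem.Chars.splitOn.go]
        simp only [hpre, Bool.false_eq_true, if_false]
        rw [ih _ _ _ (by simpa using Nat.le_of_succ_le_succ h)]
        cases hs : sp t with
        | nil => exact absurd hs (sp_ne_nil t)
        | cons y ys => simp [sp, hc, hs, prependFirst, List.modifyHead]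

theorem splitOn_eq_sp (l : List Char) : PySem.Chars.splitOn l ['\n'] = sp l := by
  rw [PySem.Chars.splitOn, splitOn_go _ _ _ _ (by omega)]
  simp [prependFirst_sp_nil]

-- replace
def repCRLF : List Char → List Char
  | [] => []
  | [c] => [c]
  | c :: d :: t => if c = '\r' ∧ d = '\n' then '\n' :: repCRLF t else c :: repCRLF (d :: t)

def repCR : List Char → List Char
  | [] => []
  | c :: t => (if c = '\r' then '\n' else c) :: repCR t

theorem replace_go_crlf (fuel : Nat) : ∀ (l acc : List Char), l.length ≤ fuel →
    PySem.Chars.replace.go ['\r', '\n'] ['\n'] fuel l acc = acc.reverse ++ repCRLF l := by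
  induction fuel with
  | zero =>
    intro l acc h
    have : l = [] := List.length_eq_zero_iff.1 (Nat.le_zero.1 h)
    subst this
    simp [PySem.Chars.replace.go, repCRLF]
  | succ n ih =>
    intro l acc h
    cases l with
    | nil => simp [PySem.Chars.replace.go, repCRLF]
    | cons c t =>
      cases t with
      | nil =>
        have hpre : List.isPrefixOf ['\r', '\n'] [c] = false := by simp [List.isPrefixOf]
        rw [PySem.Chars.replace.go]
        simp only [hpre, Bool.false_eq_true, if_false]
        rw [ih _ _ (by simp)]
        simp [repCRLF, repCR]
      | cons d t' =>
        by_cases hcd : c = '\r' ∧ d = '\n'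
        · obtain ⟨rfl, rfl⟩ := hcd
          have hpre : List.isPrefixOf ['\r', '\n'] ('\r' :: '\n' :: t') = true := by
            simp [List.isPrefixOf]
          rw [PySem.Chars.replace.go]
          simp only [hpre, if_true]
          rw [ih _ _ (by simp at h ⊢; omega)]
          simp [repCRLF]
        · have hpre : List.isPrefixOf ['\r', '\n'] (c :: d :: t') = false := by
            rcases (not_and_or.1 hcd) with hc | hd
            · simp [List.isPrefixOf]; intro hh; exact absurd hh.symm hc
            · simp [List.isPrefixOf]; intro _ hh; exact absurd hh.symm hd
          rw [PySem.Chars.replace.go]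
          simp only [hpre, Bool.false_eq_true, if_false]
          rw [ih _ _ (by simp at h ⊢; omega)]
          rw [repCRLF]
          simp [hcd]

theorem replace_go_cr (fuel : Nat) : ∀ (l acc : List Char), l.length ≤ fuel →
    PySem.Chars.replace.go ['\r'] ['\n'] fuel l acc = acc.reverse ++ repCR l := by
  induction fuel with
  | zero =>
    intro l acc h
    have : l = [] := List.length_eq_zero_iff.1 (Nat.le_zero.1 h)
    subst this
    simp [PySem.Chars.replace.go, repCR]
  | succ n ih =>
    intro l acc h
    cases l with
    | nil => simp [PySem.Chars.replace.go, repCR]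
    | cons c t =>
      by_cases hc : c = '\r'
      · subst hc
        have hpre : List.isPrefixOf ['\r'] ('\r' :: t) = true := by simp [List.isPrefixOf]
        rw [PySem.Chars.replace.go]
        simp only [hpre, if_true]
        rw [ih _ _ (by simp at h ⊢; omega)]
        simp [repCR]
      · have hpre : List.isPrefixOf ['\r'] (c :: t) = false := by
          simp [List.isPrefixOf]; intro hh; exact absurd hh.symm hc
        rw [PySem.Chars.replace.go]
        simp only [hpre, Bool.false_eq_true, if_false]
        rw [ih _ _ (by simp at h ⊢; omega)]
        simp [repCR, hc]

theorem replace_crlf (l : List Char) : PySem.Chars.replace l ['\r', '\n'] ['\n'] = repCRLF l := by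
  rw [PySem.Chars.replace]
  simp only [List.isEmpty_cons, Bool.false_eq_true, if_false]
  exact replace_go_crlf _ _ _ (by omega)

theorem replace_cr (l : List Char) : PySem.Chars.replace l ['\r'] ['\n'] = repCR l := by
  rw [PySem.Chars.replace]
  simp only [List.isEmpty_cons, Bool.false_eq_true, if_false]
  exact replace_go_cr _ _ _ (by omega)

theorem no_cr_repCR (l : List Char) : '\r' ∉ repCR l := by
  induction l with
  | nil => simp [repCR]
  | cons c t ih =>
    simp only [repCR, List.mem_cons]
    rintro (h | h)
    · by_cases hc : c = '\r' <;> simp [hc] at h <;> exact absurd h.symm (by trivial)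
    · exact ih h

theorem repCRLF_of_no_cr (l : List Char) (h : '\r' ∉ l) : repCRLF l = l := by
  induction l with
  | nil => rfl
  | cons c t ih =>
    cases t with
    | nil => rfl
    | cons d t' =>
      rw [repCRLF]
      have hc : c ≠ '\r' := fun hh => h (by simp [hh])
      simp only [hc, false_and, if_false]
      rw [ih (fun hh => h (List.mem_cons_of_mem _ hh))]

theorem repCR_of_no_cr (l : List Char) (h : '\r' ∉ l) : repCR l = l := by
  induction l with
  | nil => rfl
  | cons c t ih =>
    have hc : c ≠ '\r' := fun hh => h (by simp [hh])
    simp only [repCR, hc, if_false]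
    rw [ih (fun hh => h (List.mem_cons_of_mem _ hh))]

def blankB (k : List Char) : Bool := k.all PySem.Chars.isspace
def nullB (w : List Char) : Bool := w.isEmpty
def trimN (W : List (List Char)) : List (List Char) :=
  ((W.dropWhile nullB).reverse.dropWhile nullB).reverse

theorem strip_isEmpty (k : List Char) : nullB (PySem.Chars.strip k) = blankB k := by
  rw [Bool.eq_iff_iff]
  simp only [nullB, blankB, List.isEmpty_iff, List.all_eq_true]
  exact strip_eq_nil_iff k

theorem blankB_reverse (k : List Char) : blankB k.reverse = blankB k := by
  rw [Bool.eq_iff_iff]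
  simp [blankB, List.all_eq_true, List.mem_reverse]

theorem blank_of_blank_lstrip {d : List Char} (h : blankB (PySem.Chars.lstrip d) = true) :
    blankB d = true := by
  simp only [blankB, List.all_eq_true] at h ⊢
  intro c hc
  have h5 : c ∈ List.takeWhile PySem.Chars.isspace d ++ List.dropWhile PySem.Chars.isspace d := by
    rw [List.takeWhile_append_dropWhile]; exact hc
  rcases List.mem_append.1 h5 with h6 | h6
  · exact List.mem_takeWhile_imp h6
  · exact h c h6

theorem no_nl_lstrip {d : List Char} (h : '\n' ∉ d) : '\n' ∉ PySem.Chars.lstrip d :=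
  fun hc => h ((List.dropWhile_sublist _).subset hc)

theorem join_all_ws (K : List (List Char)) (h : ∀ k ∈ K, blankB k = true) :
    ∀ c ∈ PySem.Chars.join ['\n'] K, PySem.Chars.isspace c = true := by
  induction K with
  | nil => simp [PySem.Chars.join_nil]
  | cons k rest ih =>
    cases rest with
    | nil =>
      rw [PySem.Chars.join_singleton]
      intro c hc
      exact List.all_eq_true.1 (h k (by simp)) c hc
    | cons y ys =>
      rw [PySem.Chars.join_cons_cons]
      intro c hc
      rcases List.mem_append.1 hc with h1 | h1
      · rcases List.mem_append.1 h1 with h2 | h2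
        · exact List.all_eq_true.1 (h k (by simp)) c h2
        · simp at h2; subst h2; decide
      · exact ih (fun x hx => h x (by simp [hx])) c h1

theorem strip_join_blank (K : List (List Char)) (h : ∀ k ∈ K, blankB k = true) :
    PySem.Chars.strip (PySem.Chars.join ['\n'] K) = [] :=
  (strip_eq_nil_iff _).2 (join_all_ws K h)

theorem join_snoc (A : List (List Char)) (b : List Char) (h : A ≠ []) :
    PySem.Chars.join ['\n'] (A ++ [b]) = PySem.Chars.join ['\n'] A ++ '\n' :: b := by
  induction A with
  | nil => exact absurd rfl h
  | cons x xs ih =>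
    cases xs with
    | nil => simp [PySem.Chars.join_cons_cons, PySem.Chars.join_singleton]
    | cons y ys =>
      have e1 : (x :: y :: ys) ++ [b] = x :: y :: (ys ++ [b]) := by simp
      rw [e1, PySem.Chars.join_cons_cons]
      have e2 : y :: (ys ++ [b]) = (y :: ys) ++ [b] := by simp
      rw [e2, ih (by simp), PySem.Chars.join_cons_cons]
      simp

theorem join_reverse (X : List (List Char)) :
    (PySem.Chars.join ['\n'] X).reverse = PySem.Chars.join ['\n'] (X.reverse.map List.reverse) := by
  induction X with
  | nil => simp [PySem.Chars.join_nil]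
  | cons x xs ih =>
    cases xs with
    | nil => simp [PySem.Chars.join_singleton]
    | cons y ys =>
      rw [PySem.Chars.join_cons_cons]
      have hne : ((y :: ys).reverse.map List.reverse) ≠ [] := by simp
      rw [show (x :: y :: ys).reverse.map List.reverse
            = ((y :: ys).reverse.map List.reverse) ++ [x.reverse] by simp]
      rw [join_snoc _ _ hne, ← ih]
      simp

theorem lstrip_join (K : List (List Char)) (hnl : ∀ p ∈ K, '\n' ∉ p)
    (hD : List.dropWhile blankB K ≠ []) :
    sp (PySem.Chars.lstrip (PySem.Chars.join ['\n'] K))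
      = (List.dropWhile blankB K).modifyHead PySem.Chars.lstrip := by
  induction K with
  | nil => simp at hD
  | cons k rest ih =>
    by_cases hb : blankB k = true
    · have hrest : List.dropWhile blankB rest ≠ [] := by
        simpa [List.dropWhile_cons, hb] using hD
      have hrne : rest ≠ [] := by rintro rfl; simp at hrest
      obtain ⟨y, ys, rfl⟩ : ∃ y ys, rest = y :: ys := by
        cases rest with
        | nil => exact absurd rfl hrne
        | cons y ys => exact ⟨y, ys, rfl⟩
      rw [PySem.Chars.join_cons_cons]
      have hall : ∀ c ∈ k ++ ['\n'], PySem.Chars.isspace c = true := by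
        intro c hc
        rcases List.mem_append.1 hc with h1 | h1
        · exact List.all_eq_true.1 hb c h1
        · simp at h1; subst h1; decide
      rw [show PySem.Chars.lstrip (k ++ ['\n'] ++ PySem.Chars.join ['\n'] (y :: ys))
            = PySem.Chars.lstrip (PySem.Chars.join ['\n'] (y :: ys)) from ?_]
      · rw [ih (fun p hp => hnl p (by simp [hp])) hrest]
        simp [List.dropWhile_cons, hb]
      · simp only [PySem.Chars.lstrip]
        exact List.dropWhile_append_of_pos hall
    · have hnlk : '\n' ∉ k := hnl k (by simp)
      have hlne : PySem.Chars.lstrip k ≠ [] := by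
        intro hh
        simp only [PySem.Chars.lstrip] at hh
        exact hb (by simpa [blankB] using List.dropWhile_eq_nil_iff.1 hh)
      cases rest with
      | nil =>
        rw [PySem.Chars.join_singleton, sp_of_no_nl _ (no_nl_lstrip hnlk)]
        simp [List.dropWhile_cons, hb, List.modifyHead]
      | cons y ys =>
        rw [PySem.Chars.join_cons_cons]
        have h1 : PySem.Chars.lstrip (k ++ ['\n'] ++ PySem.Chars.join ['\n'] (y :: ys))
            = PySem.Chars.lstrip k ++ '\n' :: PySem.Chars.join ['\n'] (y :: ys) := by
          simp only [PySem.Chars.lstrip] at hlne ⊢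
          rw [List.append_assoc, List.dropWhile_append, if_neg (by simpa [List.isEmpty_iff] using hlne)]
          simp
        rw [h1, sp_append _ _ (no_nl_lstrip hnlk)]
        rw [show sp ('\n' :: PySem.Chars.join ['\n'] (y :: ys)) = [] :: sp (PySem.Chars.join ['\n'] (y :: ys)) from by simp [sp]]
        rw [sp_join (y :: ys) (by simp) (fun p hp => hnl p (by simp [hp]))]
        simp [List.dropWhile_cons, hb, List.modifyHead]

theorem strip_reverse (z : List Char) :
    PySem.Chars.strip z.reverse = (PySem.Chars.strip z).reverse := by
  show PySem.Chars.rstrip (PySem.Chars.lstrip z.reverse) = _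
  rw [show PySem.Chars.lstrip z.reverse = (PySem.Chars.rstrip z).reverse from by
        rw [rstrip_eq_reverse_lstrip]; simp]
  rw [rstrip_eq_reverse_lstrip]
  simp only [List.reverse_reverse]
  rw [lstrip_rstrip_comm]
  rfl

theorem nullB_reverse (z : List Char) : nullB z.reverse = nullB z := by
  simp [nullB]

theorem map_strip_dropWhile (L : List (List Char)) :
    (List.dropWhile blankB L).map PySem.Chars.strip
      = List.dropWhile nullB (L.map PySem.Chars.strip) := by
  rw [List.dropWhile_map]
  rw [show (nullB ∘ PySem.Chars.strip) = blankB from funext strip_isEmpty]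

theorem map_strip_map_reverse (Z : List (List Char)) :
    (Z.map List.reverse).map PySem.Chars.strip
      = ((Z.map PySem.Chars.strip).map List.reverse) := by
  simp only [List.map_map]
  exact List.map_congr_left (fun z _ => strip_reverse z)

theorem strip_sp_strip (K : List (List Char)) (hnl : ∀ p ∈ K, '\n' ∉ p)
    (hD : List.dropWhile blankB K ≠ []) :
    (sp (PySem.Chars.strip (PySem.Chars.join ['\n'] K))).map PySem.Chars.strip
      = trimN (K.map PySem.Chars.strip) := by
  obtain ⟨d, D', hDD⟩ : ∃ d D', List.dropWhile blankB K = d :: D' := by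
    cases hx : List.dropWhile blankB K with
    | nil => exact absurd hx hD
    | cons a b => exact ⟨a, b, rfl⟩
  have hsubD : ∀ p ∈ d :: D', p ∈ K := fun p hp =>
    (List.dropWhile_sublist blankB).subset (hDD ▸ hp)
  -- X = modifyHead lstrip D
  have step1 : PySem.Chars.lstrip (PySem.Chars.join ['\n'] K)
      = PySem.Chars.join ['\n'] (PySem.Chars.lstrip d :: D') := by
    conv_lhs => rw [← join_sp (PySem.Chars.lstrip (PySem.Chars.join ['\n'] K))]
    rw [lstrip_join K hnl hD, hDD]
    rfl
  set X : List (List Char) := PySem.Chars.lstrip d :: D' with hX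
  set K' : List (List Char) := X.reverse.map List.reverse with hK'
  have step2 : PySem.Chars.strip (PySem.Chars.join ['\n'] K)
      = (PySem.Chars.lstrip (PySem.Chars.join ['\n'] K')).reverse := by
    show PySem.Chars.rstrip (PySem.Chars.lstrip (PySem.Chars.join ['\n'] K)) = _
    rw [step1, rstrip_eq_reverse_lstrip, join_reverse]
  have hnlX : ∀ p ∈ X, '\n' ∉ p := by
    intro p hp
    rcases List.mem_cons.1 hp with rfl | hp2
    · exact no_nl_lstrip (hnl d (hsubD d (by simp)))
    · exact hnl p (hsubD p (by simp [hp2]))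
  have hnl' : ∀ p ∈ K', '\n' ∉ p := by
    intro p hp
    rw [hK'] at hp
    rcases List.mem_map.1 hp with ⟨q, hq, rfl⟩
    intro hc
    exact hnlX q (List.mem_reverse.1 hq) (by simpa using hc)
  have hbd : blankB d = false := by
    have hne : List.dropWhile blankB K ≠ [] := hD
    have := List.head_dropWhile_not blankB hne
    rw [head_of_cons_eq hDD] at this
    exact this
  have hD' : List.dropWhile blankB K' ≠ [] := by
    intro hh
    have hall := List.dropWhile_eq_nil_iff.1 hh
    have hmem : (PySem.Chars.lstrip d).reverse ∈ K' := by
      rw [hK']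
      exact List.mem_map.2 ⟨PySem.Chars.lstrip d, by simp [hX], rfl⟩
    have := hall _ hmem
    rw [blankB_reverse] at this
    have := blank_of_blank_lstrip this
    rw [hbd] at this
    exact absurd this (by simp)
  obtain ⟨e, E', hEE⟩ : ∃ e E', List.dropWhile blankB K' = e :: E' := by
    cases hx : List.dropWhile blankB K' with
    | nil => exact absurd hx hD'
    | cons a b => exact ⟨a, b, rfl⟩
  have step3 : PySem.Chars.lstrip (PySem.Chars.join ['\n'] K')
      = PySem.Chars.join ['\n'] (PySem.Chars.lstrip e :: E') := by
    conv_lhs => rw [← join_sp (PySem.Chars.lstrip (PySem.Chars.join ['\n'] K'))]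
    rw [lstrip_join K' hnl' hD', hEE]
    rfl
  set V : List (List Char) := PySem.Chars.lstrip e :: E' with hV
  set U : List (List Char) := V.reverse.map List.reverse with hU
  have step4 : PySem.Chars.strip (PySem.Chars.join ['\n'] K) = PySem.Chars.join ['\n'] U := by
    rw [step2, step3, join_reverse]
  have hsubE : ∀ p ∈ e :: E', p ∈ K' := fun p hp =>
    (List.dropWhile_sublist blankB).subset (hEE ▸ hp)
  have hnlV : ∀ p ∈ V, '\n' ∉ p := by
    intro p hp
    rcases List.mem_cons.1 hp with rfl | hp2
    · exact no_nl_lstrip (hnl' e (hsubE e (by simp)))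
    · exact hnl' p (hsubE p (by simp [hp2]))
  have hnlU : ∀ p ∈ U, '\n' ∉ p := by
    intro p hp
    rw [hU] at hp
    rcases List.mem_map.1 hp with ⟨q, hq, rfl⟩
    intro hc
    exact hnlV q (List.mem_reverse.1 hq) (by simpa using hc)
  have step5 : sp (PySem.Chars.strip (PySem.Chars.join ['\n'] K)) = U := by
    rw [step4, sp_join U (by simp [hU, hV]) hnlU]
  rw [step5]
  -- now the map-strip computation
  have hmsX : X.map PySem.Chars.strip = List.dropWhile nullB (K.map PySem.Chars.strip) := by
    rw [← map_strip_dropWhile, hDD, hX]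
    simp [strip_lstrip]
  have hmsK' : K'.map PySem.Chars.strip
      = ((X.map PySem.Chars.strip).reverse).map List.reverse := by
    rw [hK', map_strip_map_reverse]
    simp
  have hmsV : V.map PySem.Chars.strip = List.dropWhile nullB (K'.map PySem.Chars.strip) := by
    rw [← map_strip_dropWhile, hEE, hV]
    simp [strip_lstrip]
  have hmsU : U.map PySem.Chars.strip
      = ((V.map PySem.Chars.strip).reverse).map List.reverse := by
    rw [hU, map_strip_map_reverse]
    simp
  rw [hmsU, hmsV, hmsK', hmsX]
  rw [List.dropWhile_map]
  rw [show (nullB ∘ List.reverse) = nullB from funext nullB_reverse]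
  simp only [trimN, List.map_map, List.map_reverse]
  simp [List.map_map, Function.comp, List.map_congr_left (fun z (_ : z ∈ _) => List.reverse_reverse z)]

-- ===== loop lemmas =====
def col : List (List Char) → List (List Char) → Bool → List (List Char)
  | [], out, _ => out
  | w :: rest, out, prev =>
    if w = [] then (if prev then col rest out true else col rest (out ++ [[]]) true)
    else col rest (out ++ [w]) false

def pvPred (l : List Char) : Bool :=
  !(PySem.Set.contains pvHeadings (PySem.Chars.lower (PySem.Chars.strip l)))

theorem keepLoop_eq (L : List (List Char)) : ∀ kept,
    pvKeepLoop L kept = kept ++ L.takeWhile pvPred := by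
  induction L with
  | nil => intro kept; simp [pvKeepLoop]
  | cons l rest ih =>
    intro kept
    by_cases h : PySem.Set.contains pvHeadings (PySem.Chars.lower (PySem.Chars.strip l)) = true
    · rw [pvKeepLoop, if_pos h, List.takeWhile_cons, show pvPred l = false from by
        simp [pvPred, List.mem_of_elem_eq_true h]]
      simp
    · rw [pvKeepLoop, if_neg h, ih, List.takeWhile_cons, show pvPred l = true from by
        simp [pvPred]; simpa using h]
      simp

theorem collapseA_eq_col (L : List (List Char)) : ∀ out b,
    pvCollapseA L out b = col (L.map PySem.Chars.strip) out b := by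
  induction L with
  | nil => intro out b; simp [pvCollapseA, col]
  | cons l rest ih =>
    intro out b
    rw [pvCollapseA, List.map_cons, col]
    by_cases h : PySem.Chars.strip l = [] <;> cases b <;> simp [h, ih]

theorem fused_eq_col (L : List (List Char)) : ∀ out b,
    pvFused L out b = col ((L.takeWhile pvPred).map PySem.Chars.strip) out b := by
  induction L with
  | nil => intro out b; simp [pvFused, col]
  | cons l rest ih =>
    intro out b
    by_cases h : PySem.Set.contains pvHeadings (PySem.Chars.lower (PySem.Chars.strip l)) = true
    · rw [pvFused, if_pos h, show List.takeWhile pvPred (l :: rest) = [] from by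
        simp [List.takeWhile_cons, pvPred, List.mem_of_elem_eq_true h]]
      simp [col]
    · rw [pvFused, if_neg h, show List.takeWhile pvPred (l :: rest) = l :: List.takeWhile pvPred rest from by
        simp [List.takeWhile_cons, pvPred]; simpa using h]
      rw [List.map_cons, col]
      by_cases hs : PySem.Chars.strip l = [] <;> cases b <;> simp [hs, ih]

theorem col_out (W : List (List Char)) : ∀ out b, col W out b = out ++ col W [] b := by
  induction W with
  | nil => intro out b; simp [col]
  | cons w rest ih =>
    intro out b
    by_cases h : w = [] <;> cases b <;> rw [col, col] <;>
      simp only [h, if_true, reduceIte, Bool.false_eq_true, if_false]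
    · rw [ih (out ++ [[]]), ih ([] ++ [[]])]
      simp
    · exact ih out true
    · rw [ih (out ++ [w]), ih ([] ++ [w])]
      simp
    · rw [ih (out ++ [w]), ih ([] ++ [w])]
      simp

def flagAfter : List (List Char) → Bool → Bool
  | [], b => b
  | w :: rest, _ => flagAfter rest w.isEmpty

theorem col_append (X : List (List Char)) : ∀ (Y : List (List Char)) out b,
    col (X ++ Y) out b = col Y (col X out b) (flagAfter X b) := by
  induction X with
  | nil => intro Y out b; simp [col, flagAfter]
  | cons w rest ih =>
    intro Y out b
    rw [List.cons_append, col, col, flagAfter]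
    by_cases h : w = []
    · cases b <;>
        simp only [h, if_true, reduceIte, Bool.false_eq_true, if_false, List.isEmpty_nil] <;>
        exact ih _ _ _
    · have hw : w.isEmpty = false := by simp [List.isEmpty_iff, h]
      cases b <;>
        simp only [h, reduceIte, hw] <;>
        exact ih _ _ _

theorem col_nulls_true (V : List (List Char)) (h : ∀ w ∈ V, w = []) : ∀ out,
    col V out true = out := by
  induction V with
  | nil => intro out; simp [col]
  | cons w rest ih =>
    intro out
    have hw : w = [] := h w (by simp)
    simp [col, hw, ih (fun x hx => h x (by simp [hx]))]

theorem col_nulls_false (V : List (List Char)) (h : ∀ w ∈ V, w = []) (hne : V ≠ [])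
    (out : List (List Char)) : col V out false = out ++ [[]] := by
  cases V with
  | nil => exact absurd rfl hne
  | cons w rest =>
    have hw : w = [] := h w (by simp)
    simp [col, hw, col_nulls_true rest (fun x hx => h x (by simp [hx]))]

theorem flagAfter_nulls (V : List (List Char)) (h : ∀ w ∈ V, w = []) (hne : V ≠ []) (b : Bool) :
    flagAfter V b = true := by
  induction V generalizing b with
  | nil => exact absurd rfl hne
  | cons w rest ih =>
    cases rest with
    | nil => simp [flagAfter, h w (by simp)]
    | cons y ys =>
      rw [flagAfter]
      exact ih (fun x hx => h x (by simp [hx])) (by simp) _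

theorem flagAfter_last_nonnull (V : List (List Char)) : ∀ b (hne : V ≠ []),
    V.getLast hne ≠ [] → flagAfter V b = false := by
  induction V with
  | nil => intro b hne; exact absurd rfl hne
  | cons w rest ih =>
    intro b hne hlast
    cases rest with
    | nil =>
      simp only [List.getLast_singleton] at hlast
      simp [flagAfter, List.isEmpty_iff, hlast]
    | cons y ys =>
      rw [flagAfter]
      refine ih _ (by simp) ?_
      rwa [List.getLast_cons (by simp : (y :: ys) ≠ [])] at hlast

theorem col_last_nonnull (T : List (List Char)) : ∀ b (hne : T ≠ []),
    T.getLast hne ≠ [] → ∃ C', col T [] b = C' ++ [T.getLast hne] := by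
  induction T with
  | nil => intro b hne; exact absurd rfl hne
  | cons t rest ih =>
    intro b hne hlast
    cases rest with
    | nil =>
      simp only [List.getLast_singleton] at hlast ⊢
      refine ⟨[], ?_⟩
      simp [col, hlast]
    | cons y ys =>
      have hlast' : (y :: ys).getLast (by simp) ≠ [] := by
        rwa [List.getLast_cons (by simp : (y :: ys) ≠ [])] at hlast
      rw [show (t :: y :: ys).getLast hne = (y :: ys).getLast (by simp) from
            List.getLast_cons _]
      obtain ⟨C1, hC1⟩ := ih true (by simp) hlast'
      obtain ⟨C2, hC2⟩ := ih false (by simp) hlast'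
      rw [col]
      by_cases h : t = [] <;> cases b <;>
        simp only [h, if_true, reduceIte, Bool.false_eq_true, if_false]
      · refine ⟨[[]] ++ C1, ?_⟩
        rw [col_out, hC1]
        simp
      · exact ⟨C1, hC1⟩
      · refine ⟨[t] ++ C2, ?_⟩
        rw [col_out, hC2]
        simp
      · refine ⟨[t] ++ C2, ?_⟩
        rw [col_out, hC2]
        simp

theorem col_mem (T : List (List Char)) : ∀ out b o, o ∈ col T out b →
    o ∈ out ∨ o = [] ∨ o ∈ T := by
  induction T with
  | nil => intro out b o ho; rw [col] at ho; exact Or.inl ho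
  | cons t rest ih =>
    intro out b o ho
    rw [col] at ho
    by_cases h : t = [] <;> cases b <;>
      simp only [h, if_true, reduceIte, Bool.false_eq_true, if_false] at ho
    · rcases ih _ _ _ ho with h1 | h1 | h1
      · rcases List.mem_append.1 h1 with h2 | h2
        · exact Or.inl h2
        · simp at h2; exact Or.inr (Or.inl h2)
      · exact Or.inr (Or.inl h1)
      · exact Or.inr (Or.inr (by simp [h1]))
    · rcases ih _ _ _ ho with h1 | h1 | h1
      · exact Or.inl h1
      · exact Or.inr (Or.inl h1)
      · exact Or.inr (Or.inr (by simp [h1]))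
    all_goals
      rcases ih _ _ _ ho with h1 | h1 | h1
      · rcases List.mem_append.1 h1 with h2 | h2
        · exact Or.inl h2
        · simp at h2; exact Or.inr (Or.inr (by simp [h2]))
      · exact Or.inr (Or.inl h1)
      · exact Or.inr (Or.inr (by simp [h1]))

-- ===== stripped-line facts =====
theorem strip_eq_self_parts {l : List Char} (h : PySem.Chars.strip l = l) :
    PySem.Chars.lstrip l = l ∧ PySem.Chars.rstrip l = l := by
  have h1 : PySem.Chars.lstrip l <:+ l := List.dropWhile_suffix _
  have h2 : PySem.Chars.rstrip (PySem.Chars.lstrip l) <+: PySem.Chars.lstrip l := rstrip_prefix_head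
  have h3 : l.length ≤ (PySem.Chars.lstrip l).length := by
    have := List.IsPrefix.length_le h2
    rw [show PySem.Chars.rstrip (PySem.Chars.lstrip l) = PySem.Chars.strip l from rfl, h] at this
    exact this
  have h4 : PySem.Chars.lstrip l = l :=
    List.IsSuffix.eq_of_length h1 (Nat.le_antisymm (List.IsSuffix.length_le h1) h3)
  refine ⟨h4, ?_⟩
  rw [show PySem.Chars.rstrip l = PySem.Chars.rstrip (PySem.Chars.lstrip l) from by rw [h4]]
  exact h

theorem head_not_ws_of_lstrip_self {c : Char} {t : List Char}
    (h : PySem.Chars.lstrip (c :: t) = c :: t) : PySem.Chars.isspace c = false := by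
  by_cases hc : PySem.Chars.isspace c = true
  · exfalso
    have h2 : PySem.Chars.lstrip (c :: t) = List.dropWhile PySem.Chars.isspace t := by
      simp [PySem.Chars.lstrip, List.dropWhile_cons, hc]
    have h3 := List.IsSuffix.length_le (List.dropWhile_suffix (l := t) PySem.Chars.isspace)
    rw [h2] at h
    have := congrArg List.length h
    simp at this
    omega
  · simpa using hc

theorem strip_eq_self_of_ends {y : List Char} (hne : y ≠ [])
    (hh : PySem.Chars.isspace (y.head hne) = false)
    (hl : PySem.Chars.isspace (y.getLast hne) = false) : PySem.Chars.strip y = y := by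
  obtain ⟨c, t, rfl⟩ : ∃ c t, y = c :: t := by
    cases y with
    | nil => exact absurd rfl hne
    | cons c t => exact ⟨c, t, rfl⟩
  have h1 : PySem.Chars.lstrip (c :: t) = c :: t := by
    simp only [PySem.Chars.lstrip, List.dropWhile_cons]
    simp only [List.head_cons] at hh
    simp [hh]
  show PySem.Chars.rstrip (PySem.Chars.lstrip (c :: t)) = c :: t
  rw [h1, rstrip_eq_reverse_lstrip]
  have hrev : (c :: t).reverse ≠ [] := by simp
  obtain ⟨d, q, hdq⟩ : ∃ d q, (c :: t).reverse = d :: q := by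
    cases hx : (c :: t).reverse with
    | nil => exact absurd hx hrev
    | cons d q => exact ⟨d, q, rfl⟩
  have hd : d = (c :: t).getLast hne := by
    rw [List.getLast_eq_head_reverse]
    exact (head_of_cons_eq hdq _).symm
  rw [hdq]
  rw [show PySem.Chars.lstrip (d :: q) = d :: q from by
    simp only [PySem.Chars.lstrip, List.dropWhile_cons]
    rw [hd]
    simp [hl]]
  rw [← hdq]
  simp

theorem nonws_head_of_stripped {o : List Char} (hs : PySem.Chars.strip o = o) (hne : o ≠ []) :
    PySem.Chars.isspace (o.head hne) = false := by
  obtain ⟨c, t, rfl⟩ : ∃ c t, o = c :: t := by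
    cases o with
    | nil => exact absurd rfl hne
    | cons c t => exact ⟨c, t, rfl⟩
  exact head_not_ws_of_lstrip_self (strip_eq_self_parts hs).1

theorem nonws_last_of_stripped {o : List Char} (hs : PySem.Chars.strip o = o) (hne : o ≠ []) :
    PySem.Chars.isspace (o.getLast hne) = false := by
  have hr : PySem.Chars.rstrip o = o := (strip_eq_self_parts hs).2
  have h2 : PySem.Chars.lstrip o.reverse = o.reverse := by
    rw [rstrip_eq_reverse_lstrip] at hr
    have := congrArg List.reverse hr
    simpa using this
  obtain ⟨d, q, hdq⟩ : ∃ d q, o.reverse = d :: q := by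
    cases hx : o.reverse with
    | nil => simp at hx; exact absurd hx hne
    | cons d q => exact ⟨d, q, rfl⟩
  rw [List.getLast_eq_head_reverse, head_of_cons_eq hdq]
  rw [hdq] at h2
  exact head_not_ws_of_lstrip_self h2

theorem strip_cons_nl (x : List Char) : PySem.Chars.strip ('\n' :: x) = PySem.Chars.strip x := by
  show PySem.Chars.rstrip (PySem.Chars.lstrip ('\n' :: x)) = _
  rw [show PySem.Chars.lstrip ('\n' :: x) = PySem.Chars.lstrip x from by
    simp [PySem.Chars.lstrip, List.dropWhile_cons, show PySem.Chars.isspace '\n' = true from by decide]]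
  rfl

theorem rstrip_snoc_nl (y : List Char) : PySem.Chars.rstrip (y ++ ['\n']) = PySem.Chars.rstrip y := by
  rw [rstrip_eq_reverse_lstrip, rstrip_eq_reverse_lstrip]
  simp only [List.reverse_append, List.reverse_cons, List.reverse_nil, List.nil_append,
    List.singleton_append]
  rw [show PySem.Chars.lstrip ('\n' :: y.reverse) = PySem.Chars.lstrip y.reverse from by
    simp [PySem.Chars.lstrip, List.dropWhile_cons, show PySem.Chars.isspace '\n' = true from by decide]]

theorem strip_snoc_nl (x : List Char) : PySem.Chars.strip (x ++ ['\n']) = PySem.Chars.strip x := by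
  by_cases h : PySem.Chars.lstrip x = []
  · have hall : ∀ c ∈ x, PySem.Chars.isspace c = true := by
      simp only [PySem.Chars.lstrip] at h
      exact List.dropWhile_eq_nil_iff.1 h
    have h1 : PySem.Chars.strip (x ++ ['\n']) = [] := by
      apply (strip_eq_nil_iff _).2
      intro c hc
      rcases List.mem_append.1 hc with h2 | h2
      · exact hall c h2
      · simp at h2; subst h2; decide
    have h2 : PySem.Chars.strip x = [] := (strip_eq_nil_iff _).2 hall
    rw [h1, h2]
  · show PySem.Chars.rstrip (PySem.Chars.lstrip (x ++ ['\n'])) = PySem.Chars.rstrip (PySem.Chars.lstrip x)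
    rw [show PySem.Chars.lstrip (x ++ ['\n']) = PySem.Chars.lstrip x ++ ['\n'] from by
      simp only [PySem.Chars.lstrip] at h ⊢
      rw [List.dropWhile_append, if_neg (by simpa [List.isEmpty_iff] using h)]]
    exact rstrip_snoc_nl _

theorem head_congr {α : Type} {l₁ l₂ : List α} (h : l₁ = l₂) (h₁ : l₁ ≠ []) (h₂ : l₂ ≠ []) :
    l₁.head h₁ = l₂.head h₂ := by subst h; rfl

theorem head_of_eq_append {α : Type} {l l₁ l₂ : List α} (h : l = l₁ ++ l₂) (h₁ : l₁ ≠ [])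
    (hne : l ≠ []) : l.head hne = l₁.head h₁ := by
  subst h
  exact List.head_append_left h₁

theorem strip_join_self (C : List (List Char)) (hne : C ≠ [])
    (helts : ∀ o ∈ C, PySem.Chars.strip o = o)
    (hh : C.head hne ≠ []) (hl : C.getLast hne ≠ []) :
    PySem.Chars.strip (PySem.Chars.join ['\n'] C) = PySem.Chars.join ['\n'] C := by
  obtain ⟨t, C2, rfl⟩ : ∃ t C2, C = t :: C2 := by
    cases C with
    | nil => exact absurd rfl hne
    | cons t C2 => exact ⟨t, C2, rfl⟩
  simp only [List.head_cons] at hh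
  -- join C = t ++ z
  obtain ⟨z, hz⟩ : ∃ z, PySem.Chars.join ['\n'] (t :: C2) = t ++ z := by
    cases C2 with
    | nil => exact ⟨[], by simp [PySem.Chars.join_singleton]⟩
    | cons y ys => exact ⟨'\n' :: PySem.Chars.join ['\n'] (y :: ys), by
        rw [PySem.Chars.join_cons_cons]; simp⟩
  -- join C = z' ++ [getLast-chunk]
  set lN := (t :: C2).getLast hne with hlN
  obtain ⟨z', hz'⟩ : ∃ z', PySem.Chars.join ['\n'] (t :: C2) = z' ++ lN := by
    have hdec := List.dropLast_concat_getLast hne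
    cases hdl : (t :: C2).dropLast with
    | nil =>
      refine ⟨[], ?_⟩
      rw [show t :: C2 = [lN] from by rw [← hdec, hdl, List.nil_append]]
      simp [PySem.Chars.join_singleton]
    | cons a as =>
      refine ⟨PySem.Chars.join ['\n'] (a :: as) ++ ['\n'], ?_⟩
      conv_lhs => rw [← hdec, hdl]
      rw [join_snoc _ _ (by simp)]
      simp only [List.append_assoc, List.singleton_append]
      rw [← hlN]
  have hjne : PySem.Chars.join ['\n'] (t :: C2) ≠ [] := by
    rw [hz]
    cases t with
    | nil => exact absurd rfl hh
    | cons c q => simp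
  apply strip_eq_self_of_ends hjne
  · -- head char
    obtain ⟨c, q, rfl⟩ : ∃ c q, t = c :: q := by
      cases t with
      | nil => exact absurd rfl hh
      | cons c q => exact ⟨c, q, rfl⟩
    have hz2 : PySem.Chars.join ['\n'] ((c :: q) :: C2) = (c :: q) ++ z := by simpa using hz
    rw [head_of_eq_append hz2 (by simp)]
    have hst := helts (c :: q) (by simp)
    have := nonws_head_of_stripped hst (by simp)
    simpa using this
  · -- last char
    have hlNs : PySem.Chars.strip lN = lN := helts lN (hlN ▸ List.getLast_mem hne)
    have hlne : lN ≠ [] := hl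
    have hrw : (PySem.Chars.join ['\n'] (t :: C2)).reverse = lN.reverse ++ z'.reverse := by
      rw [hz']
      simp
    have : (PySem.Chars.join ['\n'] (t :: C2)).getLast hjne = lN.getLast hlne := by
      rw [List.getLast_eq_head_reverse, List.getLast_eq_head_reverse]
      rw [head_of_eq_append hrw (by simpa using hlne)]
    rw [this]
    exact nonws_last_of_stripped hlNs hlne

theorem getLast_of_eq_concat {α : Type} {l C' : List α} {x : α} (h : l = C' ++ [x])
    (hne : l ≠ []) : l.getLast hne = x := by
  subst h
  exact List.getLast_concat
  
theorem join_nil_cons (Z : List (List Char)) (hne : Z ≠ []) :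
    PySem.Chars.join ['\n'] ([] :: Z) = '\n' :: PySem.Chars.join ['\n'] Z := by
  cases Z with
  | nil => exact absurd rfl hne
  | cons z zs =>
    rw [PySem.Chars.join_cons_cons]
    simp

theorem strip_join_pad (C P Q : List (List Char)) (hP : P = [] ∨ P = [[]])
    (hQ : Q = [] ∨ Q = [[]]) (hCne : C ≠ [])
    (hC : PySem.Chars.strip (PySem.Chars.join ['\n'] C) = PySem.Chars.join ['\n'] C) :
    PySem.Chars.strip (PySem.Chars.join ['\n'] (P ++ C ++ Q)) = PySem.Chars.join ['\n'] C := by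
  have hQ' : PySem.Chars.strip (PySem.Chars.join ['\n'] (C ++ Q)) = PySem.Chars.join ['\n'] C := by
    rcases hQ with rfl | rfl
    · simpa using hC
    · rw [show PySem.Chars.join ['\n'] (C ++ [[]]) = PySem.Chars.join ['\n'] C ++ ['\n'] from by
        rw [join_snoc _ _ hCne]]
      rw [strip_snoc_nl]
      exact hC
  rcases hP with rfl | rfl
  · simpa using hQ'
  · rw [show ([[]] : List (List Char)) ++ C ++ Q = [] :: (C ++ Q) from by simp]
    rw [join_nil_cons _ (by simp [hCne]), strip_cons_nl]
    exact hQ'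

theorem trimN_reverse_eq (W : List (List Char)) :
    (trimN W).reverse = List.dropWhile nullB (List.dropWhile nullB W).reverse := by
  simp [trimN]

theorem trimN_prefix (W : List (List Char)) : trimN W <+: List.dropWhile nullB W := by
  have h : (trimN W).reverse <:+ (List.dropWhile nullB W).reverse := by
    rw [trimN_reverse_eq]
    exact List.dropWhile_suffix _
  have := List.reverse_prefix.mpr h
  simpa [trimN] using this

theorem nonnull_of_nullB_false {w : List Char} (h : nullB w = false) : w ≠ [] := by
  simp [nullB, List.isEmpty_iff] at h
  exact h

theorem trimN_ends (W : List (List Char)) (h : trimN W ≠ []) :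
    (trimN W).head h ≠ [] ∧ (trimN W).getLast h ≠ [] := by
  constructor
  · obtain ⟨s, hs⟩ := trimN_prefix W
    have hD : List.dropWhile nullB W ≠ [] := by
      intro hh
      rw [hh] at hs
      simp at hs
      exact h hs.1
    have hh := List.head_dropWhile_not nullB (l := W) hD
    rw [← head_of_eq_append hs.symm h hD]
    exact nonnull_of_nullB_false hh
  · rw [List.getLast_eq_head_reverse]
    have hne : (trimN W).reverse ≠ [] := by simpa using h
    have hne2 : List.dropWhile nullB (List.dropWhile nullB W).reverse ≠ [] := by
      rwa [← trimN_reverse_eq]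
    have hh := List.head_dropWhile_not nullB (l := (List.dropWhile nullB W).reverse) hne2
    rw [head_congr (trimN_reverse_eq W) hne hne2]
    exact nonnull_of_nullB_false hh

theorem trimN_idem (W : List (List Char)) : trimN (trimN W) = trimN W := by
  by_cases h : trimN W = []
  · rw [h]
    rfl
  · obtain ⟨hhead, hlast⟩ := trimN_ends W h
    have h1 : List.dropWhile nullB (trimN W) = trimN W := by
      obtain ⟨t, T2, hT⟩ : ∃ t T2, trimN W = t :: T2 := by
        cases hx : trimN W with
        | nil => exact absurd hx h
        | cons t T2 => exact ⟨t, T2, rfl⟩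
      rw [hT, List.dropWhile_cons, if_neg]
      have h3 : (trimN W).head h = t := head_of_cons_eq hT h
      rw [h3] at hhead
      simp [nullB, List.isEmpty_iff, hhead]
    have h2 : List.dropWhile nullB (trimN W).reverse = (trimN W).reverse := by
      obtain ⟨t, T2, hT⟩ : ∃ t T2, (trimN W).reverse = t :: T2 := by
        cases hx : (trimN W).reverse with
        | nil => simp at hx; exact absurd hx h
        | cons t T2 => exact ⟨t, T2, rfl⟩
      rw [hT, List.dropWhile_cons, if_neg]
      have h4 := List.getLast_eq_head_reverse h
      rw [head_of_cons_eq hT] at h4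
      rw [h4] at hlast
      simp [nullB, List.isEmpty_iff, hlast]
    rw [show trimN (trimN W)
          = ((List.dropWhile nullB (trimN W)).reverse.dropWhile nullB).reverse from rfl]
    rw [h1, h2]
    simp

theorem trimN_subset (W : List (List Char)) : ∀ o ∈ trimN W, o ∈ W := by
  intro o ho
  simp only [trimN, List.mem_reverse] at ho
  have h1 := (List.dropWhile_sublist (l := (List.dropWhile nullB W).reverse) nullB).subset ho
  rw [List.mem_reverse] at h1
  exact (List.dropWhile_sublist nullB).subset h1

theorem col_trim (W : List (List Char)) (hstr : ∀ w ∈ W, PySem.Chars.strip w = w) :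
    PySem.Chars.strip (PySem.Chars.join ['\n'] (col W [] false))
      = PySem.Chars.join ['\n'] (col (trimN W) [] false) := by
  by_cases hall : ∀ w ∈ W, w = []
  · have hDnil : List.dropWhile nullB W = [] :=
      List.dropWhile_eq_nil_iff.2 (fun w hw => by simp [nullB, hall w hw])
    have hT : trimN W = [] := by simp [trimN, hDnil]
    rw [hT]
    cases W with
    | nil => simp [col, PySem.Chars.join_nil, strip_eq_nil_iff]
    | cons w ws =>
      rw [col_nulls_false _ hall (by simp) []]
      simp [col, PySem.Chars.join_singleton, PySem.Chars.join_nil, strip_eq_nil_iff]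
  · -- some non-null line
    have hD : List.dropWhile nullB W ≠ [] := by
      intro hh
      exact hall (fun w hw => by
        have := List.dropWhile_eq_nil_iff.1 hh w hw
        simpa [nullB, List.isEmpty_iff] using this)
    have hTrw : (trimN W).reverse = List.dropWhile nullB (List.dropWhile nullB W).reverse :=
      trimN_reverse_eq W
    have hTne : trimN W ≠ [] := by
      intro hh
      rw [hh] at hTrw
      have h2 := List.dropWhile_eq_nil_iff.1 hTrw.symm
      have hd0 := List.head_dropWhile_not nullB (l := W) hD
      have hmem : (List.dropWhile nullB W).head hD ∈ (List.dropWhile nullB W).reverse := by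
        rw [List.mem_reverse]
        exact List.head_mem hD
      have := h2 _ hmem
      rw [this] at hd0
      simp at hd0
    obtain ⟨hTh, hTl⟩ := trimN_ends W hTne
    -- W = Bh ++ D with Bh all-null
    have hWdec : W = List.takeWhile nullB W ++ List.dropWhile nullB W :=
      (List.takeWhile_append_dropWhile).symm
    have hBh : ∀ w ∈ List.takeWhile nullB W, w = [] := by
      intro w hw
      have := List.mem_takeWhile_imp hw
      simpa [nullB, List.isEmpty_iff] using this
    -- D = T ++ R with R all-null
    have hDdec : List.dropWhile nullB W
        = trimN W ++ ((List.dropWhile nullB W).reverse.takeWhile nullB).reverse := by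
      have h0 := List.takeWhile_append_dropWhile (p := nullB)
        (l := (List.dropWhile nullB W).reverse)
      have h1 := congrArg List.reverse h0
      simp only [List.reverse_append, List.reverse_reverse] at h1
      have hT2 : trimN W = (List.dropWhile nullB (List.dropWhile nullB W).reverse).reverse := by
        rw [← hTrw]
        simp
      rw [hT2]
      exact h1.symm
    have hR : ∀ w ∈ ((List.dropWhile nullB W).reverse.takeWhile nullB).reverse, w = [] := by
      intro w hw
      rw [List.mem_reverse] at hw
      have := List.mem_takeWhile_imp hw
      simpa [nullB, List.isEmpty_iff] using this
    -- head of D is non-null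
    have hd0 := List.head_dropWhile_not nullB (l := W) hD
    obtain ⟨d, D2, hDD⟩ : ∃ d D2, List.dropWhile nullB W = d :: D2 := by
      cases hx : List.dropWhile nullB W with
      | nil => exact absurd hx hD
      | cons d D2 => exact ⟨d, D2, rfl⟩
    have hdne : d ≠ [] := by
      apply nonnull_of_nullB_false
      rw [← head_of_cons_eq hDD hD]
      exact hd0
    have hcolDtf : col (List.dropWhile nullB W) [] true = col (List.dropWhile nullB W) [] false := by
      rw [hDD, col, col, if_neg hdne, if_neg hdne]
    -- col W [] false = P ++ col D [] false
    obtain ⟨P, hPshape, hPcol⟩ : ∃ P, (P = [] ∨ P = [[]]) ∧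
        col W [] false = P ++ col (List.dropWhile nullB W) [] false := by
      by_cases hBhnil : List.takeWhile nullB W = []
      · refine ⟨[], Or.inl rfl, ?_⟩
        conv_lhs => rw [hWdec, hBhnil]
        simp [flagAfter]
      · refine ⟨[[]], Or.inr rfl, ?_⟩
        conv_lhs => rw [hWdec]
        rw [col_append, col_nulls_false _ hBh hBhnil, flagAfter_nulls _ hBh hBhnil]
        rw [col_out, hcolDtf]
        simp
    -- col D [] false = col T [] false ++ Q
    obtain ⟨Q, hQshape, hQcol⟩ : ∃ Q, (Q = [] ∨ Q = [[]]) ∧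
        col (List.dropWhile nullB W) [] false = col (trimN W) [] false ++ Q := by
      by_cases hRnil : ((List.dropWhile nullB W).reverse.takeWhile nullB).reverse = []
      · refine ⟨[], Or.inl rfl, ?_⟩
        conv_lhs => rw [hDdec, hRnil]
        simp
      · refine ⟨[[]], Or.inr rfl, ?_⟩
        conv_lhs => rw [hDdec]
        rw [col_append, flagAfter_last_nonnull _ _ hTne hTl]
        rw [col_nulls_false _ hR hRnil]
    -- C = col T [] false facts
    obtain ⟨t, T2, hTT⟩ : ∃ t T2, trimN W = t :: T2 := by
      cases hx : trimN W with
      | nil => exact absurd hx hTne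
      | cons t T2 => exact ⟨t, T2, rfl⟩
    have htne : t ≠ [] := by
      rw [← head_of_cons_eq hTT hTne]
      exact hTh
    have hCform : col (trimN W) [] false = t :: col T2 [] false := by
      rw [hTT, col, if_neg htne, col_out]
      simp
    have hCne : col (trimN W) [] false ≠ [] := by
      rw [hCform]
      simp
    obtain ⟨C', hC'⟩ := col_last_nonnull (trimN W) false hTne hTl
    have helts : ∀ o ∈ col (trimN W) [] false, PySem.Chars.strip o = o := by
      intro o ho
      rcases col_mem (trimN W) [] false o ho with h1 | h1 | h1
      · simp at h1
      · rw [h1]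
        rfl
      · exact hstr o (trimN_subset W o h1)
    have hChead : (col (trimN W) [] false).head hCne ≠ [] := by
      rw [head_of_cons_eq hCform]
      exact htne
    have hClast : (col (trimN W) [] false).getLast hCne ≠ [] := by
      rw [getLast_of_eq_concat hC']
      exact hTl
    have hCstr := strip_join_self (col (trimN W) [] false) hCne helts hChead hClast
    rw [hPcol, hQcol, ← List.append_assoc]
    exact strip_join_pad _ P Q hPshape hQshape hCne hCstr

theorem normalizeCR_idem (t : List Char) : pvNormalizeCR (pvNormalizeCR t) = pvNormalizeCR t := by
  simp only [pvNormalizeCR, replace_crlf, replace_cr]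
  rw [repCRLF_of_no_cr _ (no_cr_repCR _), repCR_of_no_cr _ (no_cr_repCR _)]

theorem main_eq (K : List (List Char)) (hnl : ∀ p ∈ K, '\n' ∉ p) :
    PySem.Chars.strip (PySem.Chars.join ['\n']
        (col ((sp (PySem.Chars.strip (PySem.Chars.join ['\n'] K))).map PySem.Chars.strip) [] false))
      = PySem.Chars.strip (PySem.Chars.join ['\n'] (col (K.map PySem.Chars.strip) [] false)) := by
  by_cases hall : ∀ k ∈ K, blankB k = true
  · rw [strip_join_blank K hall]
    rw [show sp [] = [[]] from rfl]
    rw [show ([[]] : List (List Char)).map PySem.Chars.strip = [[]] from rfl]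
    rw [show col [[]] [] false = [[]] from rfl]
    rw [PySem.Chars.join_singleton]
    have hWnull : ∀ w ∈ K.map PySem.Chars.strip, w = [] := by
      intro w hw
      rcases List.mem_map.1 hw with ⟨k, hk, rfl⟩
      exact (strip_eq_nil_iff k).2 (List.all_eq_true.1 (hall k hk))
    cases hK : K with
    | nil => simp [col, PySem.Chars.join_nil]
    | cons k ks =>
      rw [col_nulls_false _ (hK ▸ hWnull) (by simp) []]
      simp [PySem.Chars.join_singleton, show PySem.Chars.strip [] = [] from rfl]
  · have hD : List.dropWhile blankB K ≠ [] := fun hh => hall (List.dropWhile_eq_nil_iff.1 hh)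
    rw [strip_sp_strip K hnl hD]
    have hWstr : ∀ w ∈ K.map PySem.Chars.strip, PySem.Chars.strip w = w := by
      intro w hw
      rcases List.mem_map.1 hw with ⟨k, hk, rfl⟩
      exact strip_idem k
    have hTstr : ∀ w ∈ trimN (K.map PySem.Chars.strip), PySem.Chars.strip w = w :=
      fun w hw => hWstr w (trimN_subset _ w hw)
    rw [col_trim _ hTstr, trimN_idem, col_trim _ hWstr]

theorem ports_agree (text : String) :
    normalize_wikipedia_text text = normalize_wikipedia_text_alt text := by
  rw [normalize_wikipedia_text, normalize_wikipedia_text_alt]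
  rw [pvRemoveUnwanted]
  rw [normalizeCR_idem]
  rw [splitOn_eq_sp, splitOn_eq_sp]
  rw [keepLoop_eq, List.nil_append]
  rw [collapseA_eq_col, fused_eq_col]
  have hnl : ∀ p ∈ (sp (pvNormalizeCR text.toList)).takeWhile pvPred, '\n' ∉ p := by
    intro p hp
    exact sp_no_nl _ p ((List.takeWhile_sublist _).subset hp)
  exact congrArg String.ofList (main_eq _ hnl)

-- ===== VERDICT (by name: the statement is the Claim_ definition above) =====
theorem normalize_wikipedia_text_spec : Claim_equal_normalize_wikipedia_text := by
  intro text _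
  unfold Spec_normalize_wikipedia_text
  exact ports_agree text
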